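-- pv_equiv track=rewrite | github.com/afc1755/HFVL | bitFunctions.py | mod_32
-- ===== SOURCE A (Python) =====
-- def mod_32(in_bit):
--     in_bit = in_bit.replace(' ', '')
--     if len(in_bit) == 33:
--         in_bit = in_bit[1:]
--     mod_bit_out = ''
--     for i in range(0, len(in_bit)):
--         mod_bit_out += in_bit[i]
--         if (i + 1) % 8 == 0 and (i + 1) != len(in_bit):
--             mod_bit_out += ' '
--     return mod_bit_out
-- ===== SOURCE B (Python) =====
-- def mod_32(in_bit):
--     in_bit = in_bit.replace(' ', '')
--     if len(in_bit) == 33: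
--         in_bit = in_bit[1:]
--     chunks = []
--     while in_bit:
--         chunks.append(in_bit[:8])
--         in_bit = in_bit[8:]
--     return ' '.join(chunks)
-- ===== Notes on version B (the rewrite author's own statement) =====
-- stated objective: simpler
-- what changed: Replaced the per-character index loop with its mod-8 separator test by slicing the cleaned string into 8-character chunks and delegating separator placement to a join over the chunk list.
import Mathlib
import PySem

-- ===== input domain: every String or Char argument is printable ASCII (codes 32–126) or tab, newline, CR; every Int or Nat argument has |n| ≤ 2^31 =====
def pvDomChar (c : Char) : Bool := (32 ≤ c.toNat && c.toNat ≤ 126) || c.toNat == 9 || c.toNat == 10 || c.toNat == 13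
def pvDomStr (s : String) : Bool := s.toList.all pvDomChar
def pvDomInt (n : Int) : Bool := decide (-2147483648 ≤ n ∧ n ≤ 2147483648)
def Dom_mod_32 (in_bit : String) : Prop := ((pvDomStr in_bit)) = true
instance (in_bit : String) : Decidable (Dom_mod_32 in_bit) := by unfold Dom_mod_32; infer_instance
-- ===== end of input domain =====

-- B regroups the cleaned bit string by slicing 8-character chunks and joining them with ' ',
-- instead of A's per-character accumulation with a (i+1)%8 separator test (objective: simpler).

-- ===== PORT A =====
-- the for-loop of A: i is the running index, n = len(in_bit); acc += in_bit[i],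
-- then acc += ' ' when (i+1) % 8 == 0 and (i+1) != n (Nat % equals Python % here: both operands nonnegative)
def modLoopA (n : Nat) : List Char → Nat → List Char → List Char
  | [], _, acc => acc
  | c :: rest, i, acc =>
      let acc := acc ++ [c]
      let acc := if (i + 1) % 8 = 0 ∧ i + 1 ≠ n then acc ++ [' '] else acc
      modLoopA n rest (i + 1) acc

def mod_32 (in_bit : String) : String :=
  let cs := PySem.Chars.replace in_bit.toList [' '] []
  let cs := if cs.length = 33 then PySem.List.slice cs (some 1) none else cs
  String.ofList (modLoopA cs.length cs 0 [])

-- ===== PORT B =====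
-- the while-loop of B: peel the first 8 characters as a chunk until the string is empty
def chunksB : List Char → List (List Char)
  | [] => []
  | c :: rest => ((c :: rest).take 8) :: chunksB ((c :: rest).drop 8)
  termination_by cs => cs.length
  decreasing_by simp

def mod_32_alt (in_bit : String) : String :=
  let cs := PySem.Chars.replace in_bit.toList [' '] []
  let cs := if cs.length = 33 then PySem.List.slice cs (some 1) none else cs
  String.ofList (PySem.Chars.join [' '] (chunksB cs))

-- ===== PRECONDITION & SPEC =====
def Spec_mod_32 (in_bit : String) (out : String) : Prop := out = mod_32_alt in_bit
instance (in_bit : String) (out : String) : Decidable (Spec_mod_32 in_bit out) := by unfold Spec_mod_32; infer_instance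

-- ===== CLAIM (what is proved, stated in full; the proofs are below) =====
def Claim_equal_mod_32 : Prop := ∀ (in_bit : String), Dom_mod_32 in_bit → Spec_mod_32 in_bit (mod_32 in_bit)

-- ===== LEMMAS AND PROOFS =====

-- running A's loop over an appended list splits into two runs
lemma modLoopA_append (n : Nat) (xs ys : List Char) (i : Nat) (acc : List Char) :
    modLoopA n (xs ++ ys) i acc = modLoopA n ys (i + xs.length) (modLoopA n xs i acc) := by
  induction xs generalizing i acc with
  | nil => simp [modLoopA]
  | cons c rest ih =>
      simp only [List.cons_append, modLoopA, List.length_cons]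
      rw [ih]
      have h : i + 1 + rest.length = i + (rest.length + 1) := by omega
      rw [h]

-- a stretch on which the separator condition never fires just copies its characters
lemma modLoopA_no_sep (n : Nat) (xs : List Char) (i : Nat) (acc : List Char)
    (h : ∀ j, j < xs.length → (i + j + 1) % 8 = 0 → i + j + 1 = n) :
    modLoopA n xs i acc = acc ++ xs := by
  induction xs generalizing i acc with
  | nil => simp [modLoopA]
  | cons c rest ih =>
      simp only [modLoopA]
      have hcond : ¬ ((i + 1) % 8 = 0 ∧ i + 1 ≠ n) := by
        rintro ⟨hm, hne⟩
        exact hne (h 0 (by simp) (by simpa using hm))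
      rw [if_neg hcond, ih (i + 1) (acc ++ [c])
        (fun j hj hm => by
          have := h (j + 1) (by simpa using Nat.succ_lt_succ hj) (by omega)
          omega)]
      simp

-- equation lemmas for chunksB (well-founded recursion, not definitional)
lemma chunksB_nil : chunksB [] = [] := by rw [chunksB]

lemma chunksB_cons (c : Char) (rest : List Char) :
    chunksB (c :: rest) = ((c :: rest).take 8) :: chunksB ((c :: rest).drop 8) := by
  rw [chunksB]

-- one full 8-character chunk followed by more input: the characters plus one separator
lemma modLoopA_full_chunk (n : Nat) (xs : List Char) (i : Nat) (acc : List Char)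
    (hlen : xs.length = 8) (hi : i % 8 = 0) (hn : i + 8 ≠ n) :
    modLoopA n xs i acc = acc ++ xs ++ [' '] := by
  obtain ⟨d, hd⟩ : ∃ d, xs.drop 7 = [d] := by
    rw [List.length_eq_one_iff.symm]; simp [hlen]
  have hxs : xs = xs.take 7 ++ [d] := by rw [← hd]; exact (List.take_append_drop 7 xs).symm
  rw [hxs, modLoopA_append, modLoopA_no_sep n (xs.take 7) i acc
    (fun j hj hm => by simp [hlen] at hj; omega)]
  have h7 : (xs.take 7).length = 7 := by simp [hlen]
  rw [h7]
  simp only [modLoopA]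
  rw [if_pos (by constructor <;> omega)]
  simp

-- main invariant: from an index divisible by 8, A's loop produces acc ++ the ' '-joined 8-chunks
lemma modLoopA_eq_join (k : Nat) :
    ∀ (cs : List Char) (i : Nat) (acc : List Char), cs.length ≤ k → i % 8 = 0 →
      modLoopA (i + cs.length) cs i acc = acc ++ PySem.Chars.join [' '] (chunksB cs) := by
  induction k with
  | zero =>
      intro cs i acc hk _
      have : cs = [] := List.eq_nil_of_length_eq_zero (by omega)
      subst this; simp [modLoopA, chunksB_nil, PySem.Chars.join_nil]
  | succ k ih =>
      intro cs i acc hk hi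
      match cs with
      | [] => simp [modLoopA, chunksB_nil, PySem.Chars.join_nil]
      | c :: rest =>
        by_cases hlen : (c :: rest).length ≤ 8
        · -- a single final chunk: no separator is ever written
          have hlen' : rest.length + 1 ≤ 8 := by simpa using hlen
          rw [modLoopA_no_sep _ _ _ _ (fun j hj hm => by
            simp only [List.length_cons] at hj ⊢; omega)]
          rw [chunksB_cons, List.drop_eq_nil_of_le hlen, chunksB_nil,
            List.take_of_length_le hlen, PySem.Chars.join_singleton]
        · -- a full chunk of 8, then recurse on the rest
          rw [not_le] at hlen
          set cs := c :: rest with hcs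
          have hsplit : cs = cs.take 8 ++ cs.drop 8 := (List.take_append_drop 8 cs).symm
          have htake : (cs.take 8).length = 8 := by simp; omega
          have hdroplen : (cs.drop 8).length = cs.length - 8 := by simp
          rw [hsplit, modLoopA_append, htake,
            modLoopA_full_chunk _ _ _ _ htake hi (by simp [hsplit.symm]; omega)]
          have hn : i + (cs.take 8 ++ cs.drop 8).length = (i + 8) + (cs.drop 8).length := by
            simp; omega
          rw [hn, ih (cs.drop 8) (i + 8) _ (by omega) (by omega)]
          -- now fold the right-hand side
          obtain ⟨y, yr, hys⟩ : ∃ y yr, cs.drop 8 = y :: yr := by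
            cases h : cs.drop 8 with
            | nil => exfalso; have := hdroplen; rw [h] at this; simp at this; omega
            | cons y yr => exact ⟨y, yr, rfl⟩
          rw [← hsplit, chunksB_cons, ← hcs]
          rw [hys, chunksB_cons, PySem.Chars.join_cons_cons, ← chunksB_cons, ← hys]
          simp

theorem loop_eq_chunks (cs : List Char) :
    modLoopA cs.length cs 0 [] = PySem.Chars.join [' '] (chunksB cs) := by
  simpa using modLoopA_eq_join cs.length cs 0 [] le_rfl (by simp)

-- ===== VERDICT (by name: the statement is the Claim_ definition above) =====
theorem mod_32_spec : Claim_equal_mod_32 := by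
  intro in_bit _
  unfold Spec_mod_32 mod_32 mod_32_alt
  simp only []
  rw [loop_eq_chunks]
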